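-- pv_equiv track=rewrite | github.com/MrBrantCode/unitest_baseline | mut_generate/mist_train_cf/cf_76135/solution.py | invert_positions
-- ===== SOURCE A (Python) =====
-- def invert_positions(input_str):
--     vowels = "aeiou"
--     consonants = "bcdfghjklmnpqrstvwxyz"
--     vowels += vowels.upper()
--     consonants += consonants.upper()
--
--     new_str = list(input_str)
--     for i in range(len(input_str)-1):
--         if (input_str[i] in vowels and input_str[i+1] in consonants) or \
--            (input_str[i] in consonants and input_str[i+1] in vowels):
--             new_str[i], new_str[i+1] = new_str[i+1], new_str[i]
--
--     return ''.join(new_str)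
-- ===== SOURCE B (Python) =====
-- def _is_pair(a, b):
--     vowels = "aeiouAEIOU"
--     consonants = "bcdfghjklmnpqrstvwxyzBCDFGHJKLMNPQRSTVWXYZ"
--     return (a in vowels and b in consonants) or (a in consonants and b in vowels)
--
--
-- def invert_positions(input_str):
--     # A chain of sequential adjacent swaps equals a left rotation of the whole
--     # run block: find each maximal run of adjacent vowel/consonant pairs in the
--     # ORIGINAL string and emit its tail followed by its head.
--     cs = list(input_str)
--     n = len(cs)
--     out = []
--     i = 0
--     while i < n:
--         j = i
--         while j + 1 < n and _is_pair(cs[j], cs[j + 1]):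
--             j += 1
--         out.extend(cs[i + 1:j + 1])   # tail of the block cs[i..j]
--         out.append(cs[i])             # its head, rotated to the end
--         i = j + 1
--     return ''.join(out)
-- ===== Notes on version B (the rewrite author's own statement) =====
-- stated objective: alternative
-- what changed: Replaces A's sequence of in-place adjacent swaps driven by an index loop with a run-detection scan: find each maximal run of adjacent vowel/consonant pairs in the original string and emit that block left-rotated (tail then head), building the output in one forward pass with no mutation.
import Mathlib
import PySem

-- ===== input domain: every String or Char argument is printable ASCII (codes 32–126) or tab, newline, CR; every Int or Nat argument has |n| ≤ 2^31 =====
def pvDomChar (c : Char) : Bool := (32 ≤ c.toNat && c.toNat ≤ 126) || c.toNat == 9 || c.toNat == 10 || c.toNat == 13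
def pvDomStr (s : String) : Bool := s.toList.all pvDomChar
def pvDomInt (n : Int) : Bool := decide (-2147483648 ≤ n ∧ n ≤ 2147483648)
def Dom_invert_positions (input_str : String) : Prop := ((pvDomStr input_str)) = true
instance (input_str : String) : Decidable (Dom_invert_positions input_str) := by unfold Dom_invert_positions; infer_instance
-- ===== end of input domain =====

-- B replaces A's sequential in-place adjacent swaps by a single scan that left-rotates each
-- maximal run of adjacent vowel/consonant pairs (objective: alternative decomposition).

-- ===== PORT A =====
-- vowels = "aeiou"; vowels += vowels.upper()  (same for consonants)
def pvVowels : List Char := "aeiou".toList ++ PySem.Chars.upper "aeiou".toList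
def pvConsonants : List Char := "bcdfghjklmnpqrstvwxyz".toList ++ PySem.Chars.upper "bcdfghjklmnpqrstvwxyz".toList
-- 'c in vowels' for a single character c is char membership (exact on one-char strings)
def pvPair (a b : Char) : Bool :=
  (pvVowels.contains a && pvConsonants.contains b) ||
  (pvConsonants.contains a && pvVowels.contains b)

-- loop body: if pair(input_str[i], input_str[i+1]): new_str[i], new_str[i+1] = new_str[i+1], new_str[i]
def pvStepA (cs st : List Char) (i : Int) : List Char :=
  if pvPair (PySem.List.pyGetD cs i ' ') (PySem.List.pyGetD cs (i + 1) ' ') then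
    PySem.List.pySetD (PySem.List.pySetD st i (PySem.List.pyGetD st (i + 1) ' '))
      (i + 1) (PySem.List.pyGetD st i ' ')
  else st

def invert_positions (input_str : String) : String :=
  String.ofList
    ((PySem.List.pyRange 0 (PySem.Str.len input_str - 1) 1).foldl
      (pvStepA input_str.toList) input_str.toList)

-- ===== PORT B =====
-- inner while loop: length of the maximal chain of adjacent pairs starting at the head
def pvRunLen : Char → List Char → Nat
  | _, [] => 0
  | a, b :: l => if pvPair a b then pvRunLen b l + 1 else 0

-- outer while loop: emit each block cs[i..j] left-rotated (tail, then head), jump to j+1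
def pvScan : List Char → List Char
  | [] => []
  | c :: rest =>
      let k := pvRunLen c rest
      rest.take k ++ c :: pvScan (rest.drop k)
termination_by l => l.length
decreasing_by simp only [List.length_drop, List.length_cons]; omega

def invert_positions_alt (input_str : String) : String :=
  String.ofList (pvScan input_str.toList)

-- ===== PRECONDITION & SPEC =====
def Spec_invert_positions (input_str : String) (out : String) : Prop := out = invert_positions_alt input_str
instance (input_str : String) (out : String) : Decidable (Spec_invert_positions input_str out) := by unfold Spec_invert_positions; infer_instance

-- ===== CLAIM (what is proved, stated in full; the proofs are below) =====
def Claim_equal_invert_positions : Prop := ∀ (input_str : String), Dom_invert_positions input_str → Spec_invert_positions input_str (invert_positions input_str)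

-- ===== LEMMAS AND PROOFS =====

-- A's loop, re-expressed structurally: orig = input_str[i], pending = new_str[i], rest = input_str[i+1:]
def pvGo : Char → Char → List Char → List Char
  | _, pending, [] => [pending]
  | orig, pending, c :: rest =>
      if pvPair orig c then c :: pvGo c pending rest else pending :: pvGo c c rest

lemma pv_getD_at_len {α : Type} (l : List α) (x : α) (t : List α) (d : α) :
    (l ++ x :: t).getD l.length d = x := by
  induction l with
  | nil => rfl
  | cons a l ih => simpa using ih

lemma pv_set_at_len {α : Type} (l : List α) (x : α) (t : List α) (v : α) :
    (l ++ x :: t).set l.length v = l ++ v :: t := by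
  induction l with
  | nil => rfl
  | cons a l ih => simpa using ih

lemma pv_foldA_go (cs : List Char) :
    ∀ (tail pre0 pre : List Char) (orig pending : Char),
      cs = pre0 ++ orig :: tail → pre0.length = pre.length →
      ((List.range tail.length).map (fun k => ((pre.length + k : Nat) : Int))).foldl
          (pvStepA cs) (pre ++ pending :: tail)
        = pre ++ pvGo orig pending tail := by
  intro tail
  induction tail with
  | nil => intro pre0 pre orig pending hcs hlen; simp [pvGo]
  | cons c rest ih =>
    intro pre0 pre orig pending hcs hlen
    simp only [List.length_cons]
    rw [List.range_succ_eq_map]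
    simp only [List.map_cons, List.map_map, List.foldl_cons]
    have hget0 : PySem.List.pyGetD cs ((pre.length + 0 : Nat) : Int) ' ' = orig := by
      simp only [PySem.List.pyGetD_natCast, hcs, ← hlen, Nat.add_zero]
      exact pv_getD_at_len pre0 orig (c :: rest) ' '
    have e1 : ((pre.length + 0 : Nat) : Int) + 1 = ((pre.length + 1 : Nat) : Int) := by
      push_cast; ring
    have hget1 : PySem.List.pyGetD cs (((pre.length + 0 : Nat) : Int) + 1) ' ' = c := by
      rw [e1]
      simp only [PySem.List.pyGetD_natCast, hcs, ← hlen]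
      have h2 : pre0 ++ orig :: c :: rest = (pre0 ++ [orig]) ++ c :: rest := by simp
      have h3 : pre0.length + 1 = (pre0 ++ [orig]).length := by simp
      rw [h2, h3]
      exact pv_getD_at_len (pre0 ++ [orig]) c rest ' '
    have hstep : pvStepA cs (pre ++ pending :: c :: rest) ((pre.length + 0 : Nat) : Int)
        = if pvPair orig c then pre ++ c :: pending :: rest else pre ++ pending :: c :: rest := by
      unfold pvStepA
      rw [hget0, hget1]
      by_cases hp : pvPair orig c
      · rw [if_pos hp, if_pos hp]
        have g1 : PySem.List.pyGetD (pre ++ pending :: c :: rest)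
            (((pre.length + 0 : Nat) : Int) + 1) ' ' = c := by
          rw [e1, PySem.List.pyGetD_natCast]
          have h2 : pre ++ pending :: c :: rest = (pre ++ [pending]) ++ c :: rest := by simp
          have h3 : pre.length + 1 = (pre ++ [pending]).length := by simp
          rw [h2, h3]
          exact pv_getD_at_len (pre ++ [pending]) c rest ' '
        have g0 : PySem.List.pyGetD (pre ++ pending :: c :: rest)
            ((pre.length + 0 : Nat) : Int) ' ' = pending := by
          rw [PySem.List.pyGetD_natCast]
          simpa using pv_getD_at_len pre pending (c :: rest) ' '
        rw [g1, g0, e1]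
        simp only [PySem.List.pySetD_natCast]
        have s0 : (pre ++ pending :: c :: rest).set (pre.length + 0) c
            = pre ++ c :: c :: rest := by
          simpa using pv_set_at_len pre pending (c :: rest) c
        rw [s0]
        have h2 : pre ++ c :: c :: rest = (pre ++ [c]) ++ c :: rest := by simp
        have h3 : pre.length + 1 = (pre ++ [c]).length := by simp
        rw [h2, h3, pv_set_at_len (pre ++ [c]) c rest pending]
        simp
      · rw [if_neg hp, if_neg hp]
    rw [hstep]
    by_cases hp : pvPair orig c
    · rw [if_pos hp]
      have hmap : (List.range rest.length).map
            ((fun k => ((pre.length + k : Nat) : Int)) ∘ Nat.succ)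
          = (List.range rest.length).map (fun k => (((pre ++ [c]).length + k : Nat) : Int)) := by
        apply List.map_congr_left; intro k _
        simp [Function.comp]; ring
      have hc : pre ++ c :: pending :: rest = (pre ++ [c]) ++ pending :: rest := by simp
      have hcs' : cs = (pre0 ++ [orig]) ++ c :: rest := by simpa using hcs
      have hlen' : (pre0 ++ [orig]).length = (pre ++ [c]).length := by simp [hlen]
      rw [hmap, hc, ih (pre0 ++ [orig]) (pre ++ [c]) c pending hcs' hlen']
      simp [pvGo, hp]
    · rw [if_neg hp]
      have hmap : (List.range rest.length).map
            ((fun k => ((pre.length + k : Nat) : Int)) ∘ Nat.succ)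
          = (List.range rest.length).map (fun k => (((pre ++ [pending]).length + k : Nat) : Int)) := by
        apply List.map_congr_left; intro k _
        simp [Function.comp]; ring
      have hc : pre ++ pending :: c :: rest = (pre ++ [pending]) ++ c :: rest := by simp
      have hcs' : cs = (pre0 ++ [orig]) ++ c :: rest := by simpa using hcs
      have hlen' : (pre0 ++ [orig]).length = (pre ++ [pending]).length := by simp [hlen]
      rw [hmap, hc, ih (pre0 ++ [orig]) (pre ++ [pending]) c c hcs' hlen']
      simp [pvGo, hp]

lemma pv_scan_cons (c : Char) (rs : List Char) :
    pvScan (c :: rs) = rs.take (pvRunLen c rs) ++ c :: pvScan (rs.drop (pvRunLen c rs)) := by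
  rw [pvScan.eq_def]

lemma pv_go_scan : ∀ (rest : List Char) (orig pending : Char),
    pvGo orig pending rest
      = rest.take (pvRunLen orig rest) ++ pending :: pvScan (rest.drop (pvRunLen orig rest)) := by
  intro rest
  induction rest with
  | nil => intro orig pending; rw [pvScan.eq_def]; simp [pvGo, pvRunLen]
  | cons c rs ih =>
    intro orig pending
    by_cases hp : pvPair orig c
    · simp only [pvGo, pvRunLen, hp]
      rw [ih c pending]
      simp
    · simp only [pvGo, pvRunLen, hp]
      rw [ih c c]
      simp
      exact (pv_scan_cons c rs).symm

-- ===== VERDICT (by name: the statement is the Claim_ definition above) =====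
theorem invert_positions_spec : Claim_equal_invert_positions := by
  intro input_str _
  unfold Spec_invert_positions invert_positions invert_positions_alt
  cases h : input_str.toList with
  | nil =>
    have hlen : PySem.Str.len input_str - 1 = -1 := by
      rw [PySem.Str.len_eq, h]; rfl
    rw [hlen, pvScan.eq_def]
    simp [PySem.List.pyRange]
  | cons c rest =>
    have hlen : PySem.Str.len input_str - 1 = (rest.length : Int) := by
      rw [PySem.Str.len_eq, h]; simp
    rw [hlen, PySem.List.pyRange_zero_natCast]
    have hmap : (List.range rest.length).map (fun k => ((k : Nat) : Int))
        = (List.range rest.length).map (fun k => ((([] : List Char).length + k : Nat) : Int)) := by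
      apply List.map_congr_left; intro k _; simp
    have hfold := pv_foldA_go (c :: rest) rest [] [] c c rfl rfl
    simp only [List.nil_append] at hfold
    rw [hmap, hfold, pv_go_scan rest c c, pv_scan_cons]
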